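-- pv_equiv track=rewrite | github.com/daniel-reich/turbo-robot | AWYR47h7vCCwDmoXF_9.py | is_goal_scored
-- ===== SOURCE A (Python) =====
-- def is_goal_scored(arrays):
--     goal_definition, ball_location, counter = [], [], 0
--     for array in arrays:
--         for i in range(0,len(list(array[0])),1):
--             if list(array[0])[i] == "#" and len(goal_definition) < 2:
--                 goal_definition.append(i)
--             if list(array[0])[i] == "0":
--                 ball_location.append(counter)
--                 ball_location.append(i)
--         counter +=1
--     return True if ball_location[1] > goal_definition[0] and ball_location[1] < goal_definition[1] and ball_location[0] <= 2 else False
-- ===== SOURCE B (Python) =====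
-- def _goalposts(arrays):
--     posts = []
--     for array in arrays:
--         for i, ch in enumerate(array[0]):
--             if ch == "#":
--                 posts.append(i)
--                 if len(posts) == 2:
--                     return posts
--     return posts
--
--
-- def _ball(arrays):
--     for row, array in enumerate(arrays):
--         for i, ch in enumerate(array[0]):
--             if ch == "0":
--                 return (row, i)
--     return None
--
--
-- def is_goal_scored(arrays):
--     posts = _goalposts(arrays)
--     ball = _ball(arrays)
--     return posts[0] < ball[1] < posts[1] and ball[0] <= 2
-- ===== Notes on version B (the rewrite author's own statement) =====
-- stated objective: simpler
-- what changed: A's single combined fold threading a goal list, a flat ball list and a row counter is replaced by two independent early-exiting passes: one collecting the first two '#' columns (returning as soon as it has two), one returning the (row, col) of the first '0'.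
import Mathlib
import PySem

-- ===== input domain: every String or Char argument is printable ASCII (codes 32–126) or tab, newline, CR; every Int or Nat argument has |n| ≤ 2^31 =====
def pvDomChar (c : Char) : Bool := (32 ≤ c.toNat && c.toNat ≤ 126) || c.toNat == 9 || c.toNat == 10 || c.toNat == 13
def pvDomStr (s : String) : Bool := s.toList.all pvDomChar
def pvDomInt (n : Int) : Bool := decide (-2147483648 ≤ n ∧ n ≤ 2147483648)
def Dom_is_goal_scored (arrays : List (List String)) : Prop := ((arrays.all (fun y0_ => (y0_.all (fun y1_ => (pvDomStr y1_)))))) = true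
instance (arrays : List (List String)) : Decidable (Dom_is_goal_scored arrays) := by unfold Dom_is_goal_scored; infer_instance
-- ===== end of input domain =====

-- B replaces A's single combined scan (one fold threading goal list, flat ball list and a row
-- counter) by two independent early-exiting passes: one collecting the first two '#' columns,
-- one finding the first '0'; objective: simpler decomposition, same results wherever A returns.

-- shared reading of a row: `array[0]` as a char list ("" only where Python would raise, outside Pre_)
def hd0 (array : List String) : List Char := ((PySem.List.pyGet? array 0).getD "").toList

-- ===== PORT A =====
def is_goal_scored (arrays : List (List String)) : Bool :=
  let st := arrays.foldl
    (fun (st : List Int × List Int × Int) array =>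
      let s := hd0 array
      let p := (PySem.List.pyRange 0 (s.length : Int) 1).foldl
        (fun (p : List Int × List Int) i =>
          let c := PySem.List.pyGetD s i ' '
          (if c = '#' ∧ p.1.length < 2 then p.1 ++ [i] else p.1,
           if c = '0' then p.2 ++ [st.2.2, i] else p.2))
        (st.1, st.2.1)
      (p.1, p.2, st.2.2 + 1))
    ([], [], 0)
  if PySem.List.pyGetD st.2.1 1 0 > PySem.List.pyGetD st.1 0 0 ∧
     PySem.List.pyGetD st.2.1 1 0 < PySem.List.pyGetD st.1 1 0 ∧
     PySem.List.pyGetD st.2.1 0 0 ≤ 2 then true else false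

-- ===== PORT B =====
-- inner loop of _goalposts: walk one enumerated row; Bool = the early `return posts` fired
def postsRow : List (Int × Char) → List Int → List Int × Bool
  | [], posts => (posts, false)
  | (i, ch) :: rest, posts =>
    if ch = '#' then
      let posts' := posts ++ [i]
      if posts'.length = 2 then (posts', true) else postsRow rest posts'
    else postsRow rest posts

def goalposts : List (List String) → List Int → List Int
  | [], posts => posts
  | array :: rest, posts =>
    let pr := postsRow (PySem.List.enumerate (hd0 array) 0) posts
    if pr.2 then pr.1 else goalposts rest pr.1

-- inner loop of _ball: first '0' column in one enumerated row
def ballRow : List (Int × Char) → Option Int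
  | [] => none
  | (i, ch) :: rest => if ch = '0' then some i else ballRow rest

def findBall : List (Int × List String) → Option (Int × Int)
  | [] => none
  | (row, array) :: rest =>
    match ballRow (PySem.List.enumerate (hd0 array) 0) with
    | some i => some (row, i)
    | none => findBall rest

def is_goal_scored_alt (arrays : List (List String)) : Bool :=
  let posts := goalposts arrays []
  match findBall (PySem.List.enumerate arrays 0) with
  | none => false  -- Python B raises here (no ball), as A does; outside Pre_
  | some b =>
    decide (PySem.List.pyGetD posts 0 0 < b.2) &&
      (decide (b.2 < PySem.List.pyGetD posts 1 0) && decide (b.1 ≤ 2))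

-- ===== PRECONDITION & SPEC =====
-- spec-level description of the input (used only by Pre_ and the proofs):
-- columns of all occurrences of `ch` in one row, first string, then over all rows
def posOf (ch : Char) : List Char → Int → List Int
  | [], _ => []
  | c :: cs, i => (if c = ch then [i] else []) ++ posOf ch cs (i + 1)

def hashCols (arrays : List (List String)) : List Int :=
  arrays.flatMap (fun array => posOf '#' (hd0 array) 0)

def ballPairsFrom : List (List String) → Int → List (Int × Int)
  | [], _ => []
  | array :: rest, r => (posOf '0' (hd0 array) 0).map (fun i => (r, i)) ++ ballPairsFrom rest (r + 1)

-- Pre_ = exactly the inputs where Python A returns: every row nonempty (else array[0] raises),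
-- some '0' exists (else ball_location[1] raises), and either two '#' exist or the first '0' is
-- not right of the single first '#' (else goal_definition[0] or goal_definition[1] raises IndexError).
def Pre_is_goal_scored (arrays : List (List String)) : Prop :=
  (∀ array ∈ arrays, array ≠ []) ∧
  ballPairsFrom arrays 0 ≠ [] ∧
  (2 ≤ (hashCols arrays).length ∨
    (hashCols arrays ≠ [] ∧ (ballPairsFrom arrays 0).headI.2 ≤ (hashCols arrays).headI))
instance (arrays : List (List String)) : Decidable (Pre_is_goal_scored arrays) := by
  unfold Pre_is_goal_scored; infer_instance

def pvWitness_is_goal_scored : List (List String) := [["#0#"]]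

def Spec_is_goal_scored (arrays : List (List String)) (out : Bool) : Prop := out = is_goal_scored_alt arrays
instance (arrays : List (List String)) (out : Bool) : Decidable (Spec_is_goal_scored arrays out) := by unfold Spec_is_goal_scored; infer_instance

-- ===== CLAIM (what is proved, stated in full; the proofs are below) =====
def Claim_equal_is_goal_scored : Prop := ∀ (arrays : List (List String)), Dom_is_goal_scored arrays → Pre_is_goal_scored arrays → Spec_is_goal_scored arrays (is_goal_scored arrays)

-- ===== LEMMAS AND PROOFS =====

theorem posOf_concat (ch : Char) (t : List Char) (c : Char) (i : Int) :
    posOf ch (t ++ [c]) i = posOf ch t i ++ (if c = ch then [i + t.length] else []) := by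
  induction t generalizing i with
  | nil => simp [posOf]
  | cons a t ih => simp [posOf, ih, add_assoc]; ring_nf


theorem pyGetD_concat_left (t : List Char) (c d : Char) (i : Int) (h0 : 0 ≤ i) (h1 : i < t.length) :
    PySem.List.pyGetD (t ++ [c]) i d = PySem.List.pyGetD t i d := by
  obtain ⟨n, rfl⟩ := Int.eq_ofNat_of_zero_le h0
  simp [pysem]
  rw [List.getElem?_append_left (by exact_mod_cast h1)]

theorem innerA (s : List Char) (g b : List Int) (counter : Int) (hg : g.length ≤ 2) :
    (PySem.List.pyRange 0 (s.length : Int) 1).foldl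
      (fun (p : List Int × List Int) i =>
        (if PySem.List.pyGetD s i ' ' = '#' ∧ p.1.length < 2 then p.1 ++ [i] else p.1,
         if PySem.List.pyGetD s i ' ' = '0' then p.2 ++ [counter, i] else p.2)) (g, b)
    = ((g ++ posOf '#' s 0).take 2,
       b ++ (posOf '0' s 0).flatMap (fun i => [counter, i])) := by
  induction s using List.reverseRecOn with
  | nil => simp [PySem.List.pyRange_one_eq_nil, posOf, List.take_of_length_le hg]
  | append_singleton t c ih =>
    have hlen : ((t ++ [c]).length : Int) = (t.length : Int) + 1 := by simp
    rw [hlen, PySem.List.pyRange_one_succ_right (by positivity), List.foldl_append]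
    have hcong : (PySem.List.pyRange 0 (t.length : Int) 1).foldl
        (fun (p : List Int × List Int) i =>
          (if PySem.List.pyGetD (t ++ [c]) i ' ' = '#' ∧ p.1.length < 2 then p.1 ++ [i] else p.1,
           if PySem.List.pyGetD (t ++ [c]) i ' ' = '0' then p.2 ++ [counter, i] else p.2)) (g, b)
        = (PySem.List.pyRange 0 (t.length : Int) 1).foldl
        (fun (p : List Int × List Int) i =>
          (if PySem.List.pyGetD t i ' ' = '#' ∧ p.1.length < 2 then p.1 ++ [i] else p.1,
           if PySem.List.pyGetD t i ' ' = '0' then p.2 ++ [counter, i] else p.2)) (g, b) := by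
      apply PySem.List.foldl_congr_mem
      intro a x hx
      rw [PySem.List.mem_pyRange_one] at hx
      rw [pyGetD_concat_left t c ' ' x hx.1 hx.2]
    rw [hcong, ih]
    have hget : PySem.List.pyGetD (t ++ [c]) (t.length : Int) ' ' = c := by simp [pysem]
    simp only [List.foldl_cons, List.foldl_nil, hget, posOf_concat, zero_add]
    refine Prod.ext ?_ ?_ <;> dsimp only
    · by_cases hc : c = '#'
      · by_cases h2 : (g ++ posOf '#' t 0).length < 2
        · rw [List.take_of_length_le (by omega : (g ++ posOf '#' t 0).length ≤ 2),
              if_pos ⟨hc, h2⟩, if_pos hc, ← List.append_assoc,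
              List.take_of_length_le (by simp only [List.length_append, List.length_cons, List.length_nil]; simp only [List.length_append] at h2; omega)]
        · rw [if_neg (fun h => absurd h.2 (by simp only [List.length_take]; omega)), if_pos hc]
          conv_rhs => rw [← List.append_assoc,
            List.take_append_of_le_length (show 2 ≤ (g ++ posOf '#' t 0).length by omega)]
      · simp [hc]
    · by_cases hz : c = '0' <;> simp [hz]

theorem take_two_append (L y : List Int) : (L.take 2 ++ y).take 2 = (L ++ y).take 2 := by
  match L with
  | [] => rfl
  | [a] => rfl
  | a :: b :: L' => simp [List.take]

theorem outerA (arrays : List (List String)) (g b : List Int) (counter : Int) (hg : g.length ≤ 2) :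
    arrays.foldl
      (fun (st : List Int × List Int × Int) array =>
        let s := hd0 array
        let p := (PySem.List.pyRange 0 (s.length : Int) 1).foldl
          (fun (p : List Int × List Int) i =>
            (if PySem.List.pyGetD s i ' ' = '#' ∧ p.1.length < 2 then p.1 ++ [i] else p.1,
             if PySem.List.pyGetD s i ' ' = '0' then p.2 ++ [st.2.2, i] else p.2))
          (st.1, st.2.1)
        (p.1, p.2, st.2.2 + 1))
      (g, b, counter)
    = ((g ++ hashCols arrays).take 2,
       b ++ (ballPairsFrom arrays counter).flatMap (fun p => [p.1, p.2]),
       counter + arrays.length) := by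
  induction arrays generalizing g b counter with
  | nil => simp [hashCols, ballPairsFrom, List.take_of_length_le hg]
  | cons a rest ih =>
    simp only [List.foldl_cons]
    rw [innerA (hd0 a) g b counter hg]
    rw [ih _ _ _ (by simp [List.length_take])]
    refine Prod.ext ?_ (Prod.ext ?_ ?_) <;> dsimp only
    · rw [take_two_append]; simp [hashCols, List.append_assoc]
    · simp [ballPairsFrom, List.flatMap_map]
    · simp; omega

theorem postsRow_eq (s : List Char) (i : Int) (posts : List Int) (h : posts.length ≤ 1) :
    postsRow (PySem.List.enumerate s i) posts
      = ((posts ++ posOf '#' s i).take 2, decide (2 ≤ (posts ++ posOf '#' s i).length)) := by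
  induction s generalizing i posts with
  | nil =>
    simp [PySem.List.enumerate_nil, postsRow, posOf,
      List.take_of_length_le (by omega : posts.length ≤ 2)]
    omega
  | cons c cs ih =>
    rw [PySem.List.enumerate_cons]
    simp only [postsRow, posOf]
    by_cases hc : c = '#'
    · simp only [if_pos hc]
      by_cases h2 : (posts ++ [i]).length = 2
      · rw [if_pos h2]
        refine Prod.ext ?_ ?_ <;> dsimp only
        · rw [← List.append_assoc,
            List.take_append_of_le_length (by omega : 2 ≤ (posts ++ [i]).length),
            List.take_of_length_le (by omega : (posts ++ [i]).length ≤ 2)]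
        · rw [eq_comm, decide_eq_true_iff]
          simp only [List.length_append, List.length_cons, List.length_nil] at h2 ⊢
          omega
      · rw [if_neg h2]
        rw [ih (i + 1) (posts ++ [i])
          (by simp only [List.length_append, List.length_cons, List.length_nil] at h2 ⊢; omega)]
        simp [List.append_assoc]
    · simp only [if_neg hc]
      rw [ih (i + 1) posts h]
      simp

theorem goalposts_eq (arrays : List (List String)) (posts : List Int) (h : posts.length ≤ 1) :
    goalposts arrays posts = (posts ++ hashCols arrays).take 2 := by
  induction arrays generalizing posts with
  | nil => simp [goalposts, hashCols, List.take_of_length_le (by omega : posts.length ≤ 2)]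
  | cons a rest ih =>
    simp only [goalposts, postsRow_eq (hd0 a) 0 posts h]
    by_cases h2 : 2 ≤ (posts ++ posOf '#' (hd0 a) 0).length
    · rw [if_pos (by simpa using h2)]
      have : hashCols (a :: rest) = posOf '#' (hd0 a) 0 ++ hashCols rest := by
        simp [hashCols]
      rw [this, ← List.append_assoc, List.take_append_of_le_length h2]
    · rw [if_neg (by simpa using h2)]
      rw [ih _ (by simp only [List.length_take, List.length_append] at h2 ⊢; omega), take_two_append, List.append_assoc]
      simp [hashCols]

theorem ballRow_eq (s : List Char) (i : Int) :
    ballRow (PySem.List.enumerate s i) = (posOf '0' s i).head? := by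
  induction s generalizing i with
  | nil => simp [PySem.List.enumerate_nil, ballRow, posOf]
  | cons c cs ih =>
    rw [PySem.List.enumerate_cons]
    by_cases hz : c = '0' <;> simp [ballRow, posOf, hz, ih]

theorem findBall_eq (arrays : List (List String)) (r : Int) :
    findBall (PySem.List.enumerate arrays r) = (ballPairsFrom arrays r).head? := by
  induction arrays generalizing r with
  | nil => simp [PySem.List.enumerate_nil, findBall, ballPairsFrom]
  | cons a rest ih =>
    rw [PySem.List.enumerate_cons]
    simp only [findBall, ballRow_eq]
    cases hp : posOf '0' (hd0 a) 0 with
    | nil => simp [ballPairsFrom, hp, ih]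
    | cons x xs => simp [ballPairsFrom, hp]

-- ===== VERDICT (by name: the statement is the Claim_ definition above) =====
theorem is_goal_scored_spec : Claim_equal_is_goal_scored := by
  intro arrays _ hpre
  unfold Spec_is_goal_scored
  obtain ⟨-, hball, -⟩ := hpre
  simp only [is_goal_scored, is_goal_scored_alt]
  rw [outerA arrays [] [] 0 (by simp), goalposts_eq arrays [] (by simp), findBall_eq arrays 0]
  cases hbp : ballPairsFrom arrays 0 with
  | nil => exact absurd hbp hball
  | cons p tl =>
    simp only [List.nil_append, List.head?_cons, List.flatMap_cons, List.cons_append]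
    have h1 : PySem.List.pyGetD (p.1 :: p.2 :: List.flatMap (fun p => [p.1, p.2]) tl) 1 0 = p.2 := by
      rw [PySem.List.pyGetD_ofNat']; rfl
    have h0 : PySem.List.pyGetD (p.1 :: p.2 :: List.flatMap (fun p => [p.1, p.2]) tl) 0 0 = p.1 := by
      rw [PySem.List.pyGetD_ofNat']; rfl
    rw [h1, h0]
    by_cases c1 : PySem.List.pyGetD (List.take 2 (hashCols arrays)) 0 0 < p.2 <;>
      by_cases c2 : p.2 < PySem.List.pyGetD (List.take 2 (hashCols arrays)) 1 0 <;>
        by_cases c3 : p.1 ≤ 2 <;>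
          simp [c1, c2, c3]
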